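-- pv_equiv track=rewrite | github.com/VoiceofSiren/StudyingProgramming | Python/Coding Test/Programmers/lv0/p-031.py | solution
-- ===== SOURCE A (Python) =====
-- def solution(myString, pat):
--     new_str = ''
--     for i in range(len(myString)):
--         if myString[i] == 'A':
--             new_str += 'B'
--             continue
--         elif myString[i] == 'B':
--             new_str += 'A'
--             continue
--         else:
--             new_str += myString[i]
--     return pat in new_str and 1 or 0
-- ===== SOURCE B (Python) =====
-- def solution(myString, pat):
--     # A/B swap is an involution, so pat occurs in swap(myString)
--     # exactly when swap(pat) occurs in myString.
--     return int(pat.translate(str.maketrans('AB', 'BA')) in myString)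
-- ===== Notes on version B (the rewrite author's own statement) =====
-- stated objective: faster
-- what changed: Instead of rebuilding a swapped copy of the whole myString character by character and searching for pat in it, B maps the A/B swap over pat only (via str.translate) and tests membership in the untouched myString, exploiting that the swap is an involution.
import Mathlib
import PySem

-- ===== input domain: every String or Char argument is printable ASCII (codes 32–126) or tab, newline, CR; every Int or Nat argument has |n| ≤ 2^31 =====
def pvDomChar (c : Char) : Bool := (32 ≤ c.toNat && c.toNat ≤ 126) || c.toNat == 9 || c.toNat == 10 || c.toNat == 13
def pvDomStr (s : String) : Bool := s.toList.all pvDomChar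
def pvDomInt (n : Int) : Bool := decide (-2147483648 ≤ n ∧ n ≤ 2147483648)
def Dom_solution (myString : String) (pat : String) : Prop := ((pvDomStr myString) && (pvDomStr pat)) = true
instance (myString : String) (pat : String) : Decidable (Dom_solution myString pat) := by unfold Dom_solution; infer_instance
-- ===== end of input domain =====

-- B swaps A/B in pat (an involution) and searches the untouched myString, instead of rebuilding a swapped copy of myString.


-- ===== PORT A =====
-- for i in range(len(myString)): build new_str char by char, then 'pat in new_str and 1 or 0'
def solution (myString : String) (pat : String) : Int :=
  let new_str : List Char := myString.toList.foldl
    (fun acc c => if c = 'A' then acc ++ ['B'] else if c = 'B' then acc ++ ['A'] else acc ++ [c]) []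
  if PySem.Chars.isIn pat.toList new_str then 1 else 0

-- ===== PORT B =====
-- str.maketrans('AB','BA') applied by translate = mapping this function over pat's chars
def pvSwapAB (c : Char) : Char := if c = 'A' then 'B' else if c = 'B' then 'A' else c

def solution_alt (myString : String) (pat : String) : Int :=
  if PySem.Chars.isIn (pat.toList.map pvSwapAB) myString.toList then 1 else 0

-- ===== PRECONDITION & SPEC =====
def Spec_solution (myString : String) (pat : String) (out : Int) : Prop := out = solution_alt myString pat
instance (myString : String) (pat : String) (out : Int) : Decidable (Spec_solution myString pat out) := by unfold Spec_solution; infer_instance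

-- ===== CLAIM (what is proved, stated in full; the proofs are below) =====
def Claim_equal_solution : Prop := ∀ (myString : String) (pat : String), Dom_solution myString pat → Spec_solution myString pat (solution myString pat)

-- ===== LEMMAS AND PROOFS =====

theorem pvSwapAB_invol (c : Char) : pvSwapAB (pvSwapAB c) = c := by
  unfold pvSwapAB
  by_cases h : c = 'A' <;> by_cases h' : c = 'B' <;> simp_all

-- A's accumulator loop builds exactly the swap of the whole string
theorem solution_foldl_eq_map (l : List Char) (acc : List Char) :
    l.foldl (fun acc c => if c = 'A' then acc ++ ['B'] else if c = 'B' then acc ++ ['A'] else acc ++ [c]) acc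
      = acc ++ l.map pvSwapAB := by
  induction l generalizing acc with
  | nil => simp
  | cons c t ih =>
    simp only [List.foldl_cons, List.map_cons, ih]
    unfold pvSwapAB
    by_cases h : c = 'A' <;> by_cases h' : c = 'B' <;> simp_all

theorem infix_map_swap (pat s : List Char) :
    pat <:+: s.map pvSwapAB ↔ pat.map pvSwapAB <:+: s := by
  constructor
  · intro h
    have := h.map pvSwapAB
    simpa [List.map_map, Function.comp_def, pvSwapAB_invol] using this
  · intro h
    have := h.map pvSwapAB
    simpa [List.map_map, Function.comp_def, pvSwapAB_invol] using this

-- ===== VERDICT (by name: the statement is the Claim_ definition above) =====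
theorem solution_spec : Claim_equal_solution := by
  intro myString pat _
  unfold Spec_solution solution solution_alt
  simp only [solution_foldl_eq_map, List.nil_append,
    PySem.Chars.isIn_iff_infix, infix_map_swap]
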